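-- pv_equiv track=rewrite | github.com/mattmatt0/python_anim | fourierReverseEng.py | generateSpeeds
-- ===== SOURCE A (Python) =====
-- def generateSpeeds(amount):
--     speeds = []
--     count = 0
--     for n in range(amount):
--         if n%2:
--             speeds.append(count)
--         else:
--             speeds.append(-count)
--             count += 1
--     return speeds
-- ===== SOURCE B (Python) =====
-- def generateSpeeds(amount):
--     speeds = [0]
--     k = 1
--     while len(speeds) < amount:
--         speeds.append(k)
--         speeds.append(-k)
--         k += 1
--     return speeds[:amount]
-- ===== Notes on version B (the rewrite author's own statement) =====
-- stated objective: alternative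
-- what changed: A loops over output indices with a parity branch and a running counter; B loops over successive magnitudes, appending the symmetric pair [k, -k] to a seeded zero list and trimming any overshoot with a final slice speeds[:amount].
import Mathlib
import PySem

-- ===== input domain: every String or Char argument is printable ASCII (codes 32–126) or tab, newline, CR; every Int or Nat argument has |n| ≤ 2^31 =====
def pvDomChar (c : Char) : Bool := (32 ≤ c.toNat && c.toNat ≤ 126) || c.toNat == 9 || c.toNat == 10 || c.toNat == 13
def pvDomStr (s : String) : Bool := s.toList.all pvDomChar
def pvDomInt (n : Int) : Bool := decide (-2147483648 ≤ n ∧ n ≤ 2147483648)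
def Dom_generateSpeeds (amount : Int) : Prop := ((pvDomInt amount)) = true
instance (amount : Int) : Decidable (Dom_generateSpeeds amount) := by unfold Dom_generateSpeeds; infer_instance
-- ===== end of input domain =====

-- B replaces A's per-index parity branch and running counter by a loop over magnitudes that
-- appends the pair [k, -k] each iteration and trims with a final slice (objective: alternative).

-- ===== PORT A =====
-- step of A's for-loop body: state = (speeds, count)
def aStep (st : List Int × Int) (n : Int) : List Int × Int :=
  if PySem.Int.mod n 2 ≠ 0 then (st.1 ++ [st.2], st.2)
  else (st.1 ++ [-st.2], st.2 + 1)

def generateSpeeds (amount : Int) : List Int :=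
  ((PySem.List.pyRange 0 amount 1).foldl aStep ([], 0)).1

-- ===== PORT B =====
-- B's while-loop: while len(speeds) < amount: append k; append -k; k += 1
def altLoop (amount : Int) (speeds : List Int) (k : Int) : List Int :=
  if h : (speeds.length : Int) < amount then
    altLoop amount (speeds ++ [k, -k]) (k + 1)
  else speeds
termination_by (amount.toNat - speeds.length)
decreasing_by simp; omega

def generateSpeeds_alt (amount : Int) : List Int :=
  PySem.List.slice (altLoop amount [0] 1) none (some amount)   -- speeds[:amount]

-- ===== PRECONDITION & SPEC =====
def Spec_generateSpeeds (amount : Int) (out : List Int) : Prop := out = generateSpeeds_alt amount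
instance (amount : Int) (out : List Int) : Decidable (Spec_generateSpeeds amount out) := by unfold Spec_generateSpeeds; infer_instance

-- ===== CLAIM (what is proved, stated in full; the proofs are below) =====
def Claim_equal_generateSpeeds : Prop := ∀ (amount : Int), Dom_generateSpeeds amount → Spec_generateSpeeds amount (generateSpeeds amount)

-- ===== LEMMAS AND PROOFS =====

-- reference list: first n terms of 0, 1, -1, 2, -2, …
def specList : Nat → List Int
  | 0 => []
  | n + 1 => specList n ++ [if n % 2 = 1 then (((n + 1) / 2 : Nat) : Int) else -(((n + 1) / 2 : Nat) : Int)]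

lemma specList_length (n : Nat) : (specList n).length = n := by
  induction n with
  | zero => rfl
  | succ n ih => simp [specList, ih]

lemma specList_take (m t : Nat) (h : m ≤ t) : (specList t).take m = specList m := by
  induction t with
  | zero => interval_cases m; rfl
  | succ t ih =>
    rcases Nat.lt_or_ge m (t + 1) with hlt | hge
    · rw [specList, List.take_append_of_le_length (by simp [specList_length]; omega),
        ih (by omega)]
    · have : m = t + 1 := by omega
      subst this
      exact List.take_of_length_le (by simp [specList_length])

lemma specList_pair (j : Nat) :
    specList (2 * j + 3) = specList (2 * j + 1) ++ [(j : Int) + 1, -((j : Int) + 1)] := by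
  have h1 : (2 * j + 1) % 2 = 1 := by omega
  have h2 : (2 * j + 2) % 2 = 0 := by omega
  have h3 : (2 * j + 2) / 2 = j + 1 := by omega
  have h4 : (2 * j + 3) / 2 = j + 1 := by omega
  show specList (2 * j + 2) ++ _ = _
  rw [show 2 * j + 2 = (2 * j + 1) + 1 from rfl, specList, specList]
  simp [h1, h2, h3, h4]

-- A's fold over range(m) yields (specList m, (m+1)/2)
lemma aFold_spec (m : Nat) :
    (PySem.List.pyRange 0 (m : Int) 1).foldl aStep ([], 0) =
      (specList m, (((m + 1) / 2 : Nat) : Int)) := by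
  induction m with
  | zero => simp [specList]
  | succ m ih =>
    have hcast : ((m + 1 : Nat) : Int) = (m : Int) + 1 := by push_cast; ring
    rw [hcast, PySem.List.pyRange_one_succ_right (by positivity), List.foldl_append, ih]
    simp only [List.foldl]
    unfold aStep
    have hc : PySem.Int.mod (m : Int) 2 = ((m % 2 : Nat) : Int) := by
      rw [show ((2:Int)) = ((2:Nat):Int) by norm_num, PySem.Int.mod_natCast]
    rw [hc, specList]
    rcases Nat.even_or_odd m with he | ho
    · have h0 : m % 2 = 0 := Nat.even_iff.mp he
      have hd : (m + 1 + 1) / 2 = (m + 1) / 2 + 1 := by omega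
      rw [h0, if_neg (by norm_num), if_neg (by omega), hd]
      norm_cast
    · have h1 : m % 2 = 1 := Nat.odd_iff.mp ho
      have hd : (m + 1 + 1) / 2 = (m + 1) / 2 := by omega
      rw [h1, if_pos (by norm_num), if_pos rfl, hd]

lemma generateSpeeds_eq_spec (amount : Int) :
    generateSpeeds amount = specList amount.toNat := by
  unfold generateSpeeds
  by_cases h : amount ≤ 0
  · rw [PySem.List.pyRange_one_eq_nil h]
    simp [show amount.toNat = 0 by omega, specList]
  · have heq : amount = ((amount.toNat : Nat) : Int) := by omega
    rw [heq, aFold_spec]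
    simp
    congr 1
    omega

-- B's while loop, starting from a full odd prefix, ends at a full odd prefix long enough
lemma altLoop_spec (d : Nat) : ∀ (j : Nat) (amount : Int),
    amount.toNat ≤ 2 * j + 1 + d →
    ∃ t : Nat, altLoop amount (specList (2 * j + 1)) ((j : Int) + 1) = specList (2 * t + 1) ∧
      amount ≤ 2 * (t : Int) + 1 ∧ 2 * t + 1 ≤ max (2 * j + 1) (amount.toNat + 1) := by
  induction d with
  | zero =>
    intro j amount hle
    refine ⟨j, ?_, by omega, by omega⟩
    rw [altLoop, dif_neg]
    rw [specList_length]
    omega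
  | succ d ih =>
    intro j amount hle
    by_cases hlt : ((specList (2 * j + 1)).length : Int) < amount
    · rw [altLoop, dif_pos hlt]
      have hpair : specList (2 * j + 1) ++ [(j : Int) + 1, -((j : Int) + 1)] = specList (2 * (j + 1) + 1) := by
        rw [show 2 * (j + 1) + 1 = 2 * j + 3 from by ring, specList_pair]
      have hk : ((j : Int) + 1) + 1 = ((j + 1 : Nat) : Int) + 1 := by push_cast; ring
      rw [hpair, hk]
      rw [specList_length] at hlt
      obtain ⟨t, h1, h2, h3⟩ := ih (j + 1) amount (by omega)
      exact ⟨t, h1, h2, by omega⟩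
    · rw [altLoop, dif_neg hlt]
      rw [specList_length] at hlt
      exact ⟨j, rfl, by omega, by omega⟩

lemma generateSpeeds_alt_eq_spec (amount : Int) :
    generateSpeeds_alt amount = specList amount.toNat := by
  unfold generateSpeeds_alt
  obtain ⟨t, ht, hlen, hub⟩ := altLoop_spec amount.toNat 0 amount (by omega)
  have h0 : specList (2 * 0 + 1) = [(0 : Int)] := by rfl
  rw [h0] at ht
  have hk : ((0 : Nat) : Int) + 1 = 1 := by norm_num
  rw [← hk, ht]
  by_cases h : 0 ≤ amount
  · rw [PySem.List.slice_to _ h, specList_take amount.toNat (2 * t + 1) (by omega)]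
  · have h2 : amount.toNat = 0 := by omega
    have ht0 : t = 0 := by omega
    rw [h2, ht0]
    have hneg : amount = -(((-amount).toNat : Nat) : Int) := by omega
    have hk1 : 0 < (-amount).toNat := by omega
    rw [hneg, PySem.List.slice_to_neg_natCast _ _ hk1]
    simp [specList, show 1 - (-amount).toNat = 0 from by omega]

-- ===== VERDICT (by name: the statement is the Claim_ definition above) =====
theorem generateSpeeds_spec : Claim_equal_generateSpeeds := by
  intro amount _
  unfold Spec_generateSpeeds
  rw [generateSpeeds_eq_spec, generateSpeeds_alt_eq_spec]
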